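-- pv_equiv track=rewrite | github.com/AdroMine/AdventOfCode | 2015/Day24/d24_solution.py | gen_config3
-- ===== SOURCE A (Python) =====
-- from itertools import combinations
-- from math import prod
--
-- def gen_config3(weights, n_groups):
--     goal = sum(weights) // n_groups
--
--     res = 1000000000000
--     for k in range(1, len(weights)//n_groups):
--         ans = min(prod(comb) if sum(comb) == goal else res for comb in combinations(weights, k))
--         if ans < res:
--             return ans
--     return res
-- ===== SOURCE B (Python) =====
-- def gen_config3(weights, n_groups):
--     goal = sum(weights) // n_groups
--     res = 1000000000000
--     maxk = len(weights) // n_groups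
--     if maxk <= 1:
--         return res
--     # dp[(count, sum)] = (min product, max product) over subsets of the weights seen so far
--     dp = {(0, 0): (1, 1)}
--     for w in weights:
--         nxt = dict(dp)
--         for (c, s), (lo, hi) in dp.items():
--             if c + 1 < maxk:
--                 key = (c + 1, s + w)
--                 clo, chi = min(lo * w, hi * w), max(lo * w, hi * w)
--                 prev = nxt.get(key)
--                 if prev is None:
--                     nxt[key] = (clo, chi)
--                 else:
--                     nxt[key] = (min(prev[0], clo), max(prev[1], chi))
--         dp = nxt
--     for k in range(1, maxk):
--         entry = dp.get((k, goal))
--         if entry is not None and entry[0] < res: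
--             return entry[0]
--     return res
-- ===== Notes on version B (the rewrite author's own statement) =====
-- stated objective: alternative
-- what changed: Replaces the per-size enumeration of all itertools.combinations with a single dynamic-programming pass over the weights that keeps, for each (subset size, subset sum) pair, the attained minimum and maximum subset product in a dictionary, then reads the answer off the table for k = 1..maxk-1.
import Mathlib
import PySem

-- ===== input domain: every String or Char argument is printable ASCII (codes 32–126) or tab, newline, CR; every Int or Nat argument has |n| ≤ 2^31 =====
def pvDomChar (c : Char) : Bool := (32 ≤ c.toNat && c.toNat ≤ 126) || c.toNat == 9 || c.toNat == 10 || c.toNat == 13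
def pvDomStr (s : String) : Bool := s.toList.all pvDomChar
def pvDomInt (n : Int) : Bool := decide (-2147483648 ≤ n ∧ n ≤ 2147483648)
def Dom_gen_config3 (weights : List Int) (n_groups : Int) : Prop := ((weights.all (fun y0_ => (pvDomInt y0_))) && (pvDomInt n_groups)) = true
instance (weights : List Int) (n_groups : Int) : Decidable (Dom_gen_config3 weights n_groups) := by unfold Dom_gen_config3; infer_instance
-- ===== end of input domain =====

-- B replaces A's per-size enumeration of all combinations with a single dynamic
-- programming pass keeping, per (subset size, subset sum), the min and max subset
-- product; equal return value proved on Pre_ (n_groups ≠ 0).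

-- ===== PORT A =====
-- itertools.combinations(weights, k), in the same order (combinations with the
-- first element, then those without)
def pyCombos : Nat → List Int → List (List Int)
  | 0, _ => [[]]
  | _ + 1, [] => []
  | k + 1, x :: xs => (pyCombos k xs).map (fun c => x :: c) ++ pyCombos (k + 1) xs

-- math.prod
def pyProd (c : List Int) : Int := c.foldl (· * ·) 1

-- the 'for k in range(...)' loop with its early return
def aScan (weights : List Int) (goal res : Int) : List Int → Int
  | [] => res
  | k :: ks =>
    -- min(...) over the generator; the generator is never empty when this line
    -- is reached in Python, so the .getD default is unreachable
    let ans := (PySem.List.min?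
      ((pyCombos k.toNat weights).map (fun c => if c.sum = goal then pyProd c else res))
      (fun x => x)).getD res
    if ans < res then ans else aScan weights goal res ks

def gen_config3 (weights : List Int) (n_groups : Int) : Int :=
  let goal := PySem.Int.floordiv weights.sum n_groups
  let res : Int := 1000000000000
  aScan weights goal res
    (PySem.List.pyRange 1 (PySem.Int.floordiv (weights.length : Int) n_groups) 1)

-- ===== PORT B =====
-- body of B's inner 'for (c, s), (lo, hi) in dp.items()' loop
def bBody (maxk w : Int) (nxt : PySem.Dict (Int × Int) (Int × Int))
    (it : (Int × Int) × (Int × Int)) : PySem.Dict (Int × Int) (Int × Int) :=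
  if it.1.1 + 1 < maxk then
    let key := (it.1.1 + 1, it.1.2 + w)
    let clo := min (it.2.1 * w) (it.2.2 * w)
    let chi := max (it.2.1 * w) (it.2.2 * w)
    match nxt.get? key with
    | none => nxt.insert key (clo, chi)
    | some (plo, phi) => nxt.insert key (min plo clo, max phi chi)
  else nxt

-- one pass of B's outer 'for w in weights' loop: nxt starts as a copy of dp
def bStep (maxk w : Int) (dp : PySem.Dict (Int × Int) (Int × Int)) :
    PySem.Dict (Int × Int) (Int × Int) :=
  dp.items.foldl (bBody maxk w) dp

-- B's final 'for k in range(1, maxk)' query loop with its early return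
def bQuery (dp : PySem.Dict (Int × Int) (Int × Int)) (goal res : Int) : List Int → Int
  | [] => res
  | k :: ks =>
    match dp.get? (k, goal) with
    | some (lo, _) => if lo < res then lo else bQuery dp goal res ks
    | none => bQuery dp goal res ks

def gen_config3_alt (weights : List Int) (n_groups : Int) : Int :=
  let goal := PySem.Int.floordiv weights.sum n_groups
  let res : Int := 1000000000000
  let maxk := PySem.Int.floordiv (weights.length : Int) n_groups
  if maxk ≤ 1 then res
  else
    let dp := weights.foldl (fun dp w => bStep maxk w dp)
      ((PySem.Dict.empty).insert ((0 : Int), (0 : Int)) ((1 : Int), (1 : Int)))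
    bQuery dp goal res (PySem.List.pyRange 1 maxk 1)

-- ===== PRECONDITION & SPEC =====
-- Pre_ excludes n_groups = 0, on which Python A raises ZeroDivisionError.
def Pre_gen_config3 (weights : List Int) (n_groups : Int) : Prop := n_groups ≠ 0
instance (weights : List Int) (n_groups : Int) : Decidable (Pre_gen_config3 weights n_groups) := by
  unfold Pre_gen_config3; infer_instance

def pvWitness_gen_config3 : List Int × Int := ([1, 2, 3, 3, 5, 4], 2)

def Spec_gen_config3 (weights : List Int) (n_groups : Int) (out : Int) : Prop := out = gen_config3_alt weights n_groups
instance (weights : List Int) (n_groups : Int) (out : Int) : Decidable (Spec_gen_config3 weights n_groups out) := by unfold Spec_gen_config3; infer_instance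

-- ===== CLAIM (what is proved, stated in full; the proofs are below) =====
def Claim_equal_gen_config3 : Prop := ∀ (weights : List Int) (n_groups : Int), Dom_gen_config3 weights n_groups → Pre_gen_config3 weights n_groups → Spec_gen_config3 weights n_groups (gen_config3 weights n_groups)

-- ===== LEMMAS AND PROOFS =====

-- a size-k combination with sum s drawn from ws
def Matching (ws : List Int) (k : Nat) (s : Int) (L : List Int) : Prop :=
  L ∈ pyCombos k ws ∧ L.sum = s

-- what an entry of B's dp table means: none = no matching combination; some (lo, hi) =
-- attained min and max of the products of the matching combinations
def MMspec (ws : List Int) (k : Nat) (s : Int) : Option (Int × Int) → Prop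
  | none => ∀ L, ¬ Matching ws k s L
  | some (lo, hi) =>
      (∃ L, Matching ws k s L ∧ pyProd L = lo) ∧
      (∃ L, Matching ws k s L ∧ pyProd L = hi) ∧
      (∀ L, Matching ws k s L → lo ≤ pyProd L ∧ pyProd L ≤ hi)

def CntOK (maxk c : Int) : Prop := c = 0 ∨ (1 ≤ c ∧ c < maxk)

def dpInv (maxk : Int) (ws : List Int) (dp : PySem.Dict (Int × Int) (Int × Int)) : Prop :=
  dp.keys.Nodup ∧
  ∀ c s : Int,
    (¬ CntOK maxk c → dp.get? (c, s) = none) ∧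
    (CntOK maxk c → MMspec ws c.toNat s (dp.get? (c, s)))

lemma mem_pyCombos : ∀ (xs : List Int) (k : Nat) (L : List Int),
    L ∈ pyCombos k xs ↔ L.length = k ∧ L.Sublist xs := by
  intro xs
  induction xs with
  | nil =>
    intro k L
    cases k with
    | zero => simp [pyCombos, List.length_eq_zero_iff]
    | succ k => simp [pyCombos]; rintro h rfl; simp at h
  | cons x xs ih =>
    intro k L
    cases k with
    | zero =>
      simp [pyCombos, List.length_eq_zero_iff]
      rintro rfl; exact List.nil_sublist _
    | succ k =>
      simp only [pyCombos, List.mem_append, List.mem_map, ih, List.sublist_cons_iff]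
      constructor
      · rintro (⟨t, ⟨hl, hs⟩, rfl⟩ | ⟨hl, hs⟩)
        · exact ⟨by simp [hl], Or.inr ⟨t, rfl, hs⟩⟩
        · exact ⟨hl, Or.inl hs⟩
      · rintro ⟨hl, hs | ⟨r, rfl, hs⟩⟩
        · exact Or.inr ⟨hl, hs⟩
        · exact Or.inl ⟨r, ⟨by simpa using hl, hs⟩, rfl⟩

lemma sublist_append_singleton {L xs : List Int} {w : Int} :
    L.Sublist (xs ++ [w]) ↔ L.Sublist xs ∨ ∃ r, L = r ++ [w] ∧ r.Sublist xs := by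
  rw [← List.reverse_sublist]
  simp only [List.reverse_append, List.reverse_cons, List.reverse_nil, List.nil_append,
    List.singleton_append, List.sublist_cons_iff, List.reverse_sublist]
  constructor
  · rintro (h | ⟨r, hr, hs⟩)
    · exact Or.inl h
    · refine Or.inr ⟨r.reverse, ?_, ?_⟩
      · have := congrArg List.reverse hr
        simpa using this
      · rw [← List.reverse_sublist]
        simpa using hs
  · rintro (h | ⟨r, rfl, hs⟩)
    · exact Or.inl h
    · exact Or.inr ⟨r.reverse, by simp, by simpa using hs⟩

lemma pyCombos_append_singleton_mem {L : List Int} {w : Int} {k : Nat} {xs : List Int} :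
    L ∈ pyCombos k (xs ++ [w]) ↔
      L ∈ pyCombos k xs ∨ (1 ≤ k ∧ ∃ r, r ∈ pyCombos (k - 1) xs ∧ L = r ++ [w]) := by
  simp only [mem_pyCombos, sublist_append_singleton]
  constructor
  · rintro ⟨hl, hs | ⟨r, rfl, hs⟩⟩
    · exact Or.inl ⟨hl, hs⟩
    · refine Or.inr ⟨by simp at hl; omega, r, ⟨by simp at hl; omega, hs⟩, rfl⟩
  · rintro (⟨hl, hs⟩ | ⟨hk, r, ⟨hl, hs⟩, rfl⟩)
    · exact ⟨hl, Or.inl hs⟩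
    · exact ⟨by simp [hl]; omega, Or.inr ⟨r, rfl, hs⟩⟩

def Touch (maxk w : Int) (it : (Int × Int) × (Int × Int)) (q : Int × Int) : Prop :=
  it.1.1 + 1 < maxk ∧ (it.1.1 + 1, it.1.2 + w) = q

lemma bBody_get?_not_touch (maxk w : Int) (acc : PySem.Dict (Int × Int) (Int × Int))
    (it : (Int × Int) × (Int × Int)) (q : Int × Int) (h : ¬ Touch maxk w it q) :
    (bBody maxk w acc it).get? q = acc.get? q := by
  unfold bBody
  split_ifs with hc
  · have hne : q ≠ (it.1.1 + 1, it.1.2 + w) := fun e => h ⟨hc, e.symm⟩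
    rcases hg : acc.get? (it.1.1 + 1, it.1.2 + w) with _ | ⟨plo, phi⟩ <;>
      simp only [hg] <;> exact PySem.Dict.get?_insert_of_ne _ _ hne
  · rfl

lemma bBody_get?_touch (maxk w : Int) (acc : PySem.Dict (Int × Int) (Int × Int))
    (it : (Int × Int) × (Int × Int)) (q : Int × Int) (h : Touch maxk w it q) :
    (bBody maxk w acc it).get? q =
      some (match acc.get? q with
        | none => (min (it.2.1 * w) (it.2.2 * w), max (it.2.1 * w) (it.2.2 * w))
        | some (plo, phi) => (min plo (min (it.2.1 * w) (it.2.2 * w)),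
                              max phi (max (it.2.1 * w) (it.2.2 * w)))) := by
  obtain ⟨hc, hk⟩ := h
  unfold bBody
  rw [if_pos hc]
  rcases hg : acc.get? (it.1.1 + 1, it.1.2 + w) with _ | ⟨plo, phi⟩ <;>
    simp only [hg, ← hk] <;> exact PySem.Dict.get?_insert_self _ _ _

lemma bBody_nodup (maxk w : Int) (acc : PySem.Dict (Int × Int) (Int × Int))
    (it : (Int × Int) × (Int × Int)) (h : acc.keys.Nodup) :
    (bBody maxk w acc it).keys.Nodup := by
  unfold bBody
  split_ifs with hc
  · rcases hg : acc.get? (it.1.1 + 1, it.1.2 + w) with _ | ⟨plo, phi⟩ <;>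
      simp only [hg] <;> exact PySem.Dict.nodup_keys_insert _ _ _ h
  · exact h

lemma foldl_nodup (maxk w : Int) : ∀ (its : List ((Int × Int) × (Int × Int)))
    (acc : PySem.Dict (Int × Int) (Int × Int)), acc.keys.Nodup →
    (its.foldl (bBody maxk w) acc).keys.Nodup := by
  intro its
  induction its with
  | nil => intro acc h; exact h
  | cons it its ih => intro acc h; exact ih _ (bBody_nodup maxk w acc it h)

lemma foldl_no_touch (maxk w : Int) : ∀ (its : List ((Int × Int) × (Int × Int)))
    (acc : PySem.Dict (Int × Int) (Int × Int)) (q : Int × Int),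
    (∀ it ∈ its, ¬ Touch maxk w it q) →
    (its.foldl (bBody maxk w) acc).get? q = acc.get? q := by
  intro its
  induction its with
  | nil => intro acc q _; rfl
  | cons it its ih =>
    intro acc q h
    rw [List.foldl_cons, ih _ q (fun j hj => h j (List.mem_cons_of_mem _ hj)),
      bBody_get?_not_touch maxk w acc it q (h it List.mem_cons_self)]

lemma foldl_hit (maxk w : Int) (its₁ its₂ : List ((Int × Int) × (Int × Int)))
    (it : (Int × Int) × (Int × Int)) (acc : PySem.Dict (Int × Int) (Int × Int))
    (q : Int × Int) (h : Touch maxk w it q)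
    (h₁ : ∀ j ∈ its₁, ¬ Touch maxk w j q) (h₂ : ∀ j ∈ its₂, ¬ Touch maxk w j q) :
    ((its₁ ++ it :: its₂).foldl (bBody maxk w) acc).get? q =
      some (match acc.get? q with
        | none => (min (it.2.1 * w) (it.2.2 * w), max (it.2.1 * w) (it.2.2 * w))
        | some (plo, phi) => (min plo (min (it.2.1 * w) (it.2.2 * w)),
                              max phi (max (it.2.1 * w) (it.2.2 * w)))) := by
  rw [List.foldl_append, List.foldl_cons, foldl_no_touch maxk w its₂ _ q h₂,
    bBody_get?_touch maxk w _ it q h, foldl_no_touch maxk w its₁ acc q h₁]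

lemma ne_fst_of_nodup {α β : Type} (its₁ its₂ : List (α × β)) (it : α × β)
    (h : ((its₁ ++ it :: its₂).map (·.1)).Nodup) :
    ∀ j, (j ∈ its₁ ∨ j ∈ its₂) → j.1 ≠ it.1 := by
  rw [List.map_append] at h
  obtain ⟨h1, h2, hdisj⟩ := List.nodup_append.mp h
  rw [List.map_cons, List.nodup_cons] at h2
  rintro j (hj | hj) he
  · exact hdisj _ (List.mem_map_of_mem hj) _ (by rw [List.map_cons]; exact List.mem_cons_self) he
  · exact h2.1 (he ▸ List.mem_map_of_mem hj)

lemma bStep_get? (maxk w : Int) (dp : PySem.Dict (Int × Int) (Int × Int))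
    (hnd : dp.keys.Nodup) (c s : Int) :
    (bStep maxk w dp).get? (c, s) =
      match (if c < maxk then dp.get? (c - 1, s - w) else none) with
      | none => dp.get? (c, s)
      | some (lo, hi) =>
          some (match dp.get? (c, s) with
            | none => (min (lo * w) (hi * w), max (lo * w) (hi * w))
            | some (plo, phi) =>
                (min plo (min (lo * w) (hi * w)), max phi (max (lo * w) (hi * w)))) := by
  by_cases hc : c < maxk
  · rcases hg : dp.get? (c - 1, s - w) with _ | ⟨lo, hi⟩
    · simp only [if_pos hc]
      apply foldl_no_touch
      intro it hit htouch
      obtain ⟨hlt, hk⟩ := htouch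
      have h1 : it.1.1 = c - 1 := by
        have := congrArg Prod.fst hk; simp at this; omega
      have h2 : it.1.2 = s - w := by
        have := congrArg Prod.snd hk; simp at this; omega
      have : dp.get? (c - 1, s - w) = some it.2 := by
        have hmem : (it.1, it.2) ∈ dp.items := by simpa using hit
        rw [← h1, ← h2]
        exact PySem.Dict.get?_of_mem_items _ hmem hnd
      rw [this] at hg; cases hg
    · have hmem : ((c - 1, s - w), (lo, hi)) ∈ dp.items :=
        PySem.Dict.mem_items_of_get?_eq_some _ hg
      obtain ⟨l₁, l₂, hsplit⟩ := List.append_of_mem hmem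
      have hnd' : ((l₁ ++ ((c - 1, s - w), (lo, hi)) :: l₂).map (·.1)).Nodup := by
        rw [← hsplit]; exact hnd
      have htouch : Touch maxk w ((c - 1, s - w), (lo, hi)) (c, s) := by
        constructor
        · simp; omega
        · simp
      have hother : ∀ j, (j ∈ l₁ ∨ j ∈ l₂) → ¬ Touch maxk w j (c, s) := by
        intro j hj ⟨hlt, hk⟩
        apply ne_fst_of_nodup l₁ l₂ _ hnd' j hj
        have e1 := congrArg Prod.fst hk
        have e2 := congrArg Prod.snd hk
        simp at e1 e2
        ext <;> simp <;> try omega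
      unfold bStep
      rw [hsplit, if_pos hc]
      exact foldl_hit maxk w l₁ l₂ _ dp (c, s) htouch
        (fun j hj => hother j (Or.inl hj)) (fun j hj => hother j (Or.inr hj))
  · simp only [if_neg hc]
    apply foldl_no_touch
    intro it hit ⟨hlt, hk⟩
    have := congrArg Prod.fst hk; simp at this
    omega


lemma pyProd_append (r : List Int) (w : Int) : pyProd (r ++ [w]) = pyProd r * w := by
  simp [pyProd, List.foldl_append]

lemma Matching_append {w : Int} {k : Nat} {pre : List Int} {s : Int} {L : List Int} :
    Matching (pre ++ [w]) k s L ↔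
      Matching pre k s L ∨ (1 ≤ k ∧ ∃ r, Matching pre (k - 1) (s - w) r ∧ L = r ++ [w]) := by
  unfold Matching
  rw [pyCombos_append_singleton_mem]
  constructor
  · rintro ⟨h | ⟨hk, r, hr, rfl⟩, hs⟩
    · exact Or.inl ⟨h, hs⟩
    · exact Or.inr ⟨hk, r, ⟨hr, by simp at hs; omega⟩, rfl⟩
  · rintro (⟨h, hs⟩ | ⟨hk, r, ⟨hr, hs⟩, rfl⟩)
    · exact ⟨Or.inl h, hs⟩
    · exact ⟨Or.inr ⟨hk, r, hr, rfl⟩, by simp; omega⟩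

lemma mul_between {lo p hi w : Int} (h1 : lo ≤ p) (h2 : p ≤ hi) :
    min (lo * w) (hi * w) ≤ p * w ∧ p * w ≤ max (lo * w) (hi * w) := by
  rcases le_total 0 w with hw | hw
  · exact ⟨le_trans (min_le_left _ _) (mul_le_mul_of_nonneg_right h1 hw),
      le_trans (mul_le_mul_of_nonneg_right h2 hw) (le_max_right _ _)⟩
  · exact ⟨le_trans (min_le_right _ _) (mul_le_mul_of_nonpos_right h2 hw),
      le_trans (mul_le_mul_of_nonpos_right h1 hw) (le_max_left _ _)⟩

lemma attain_min {P : List Int → Prop} {a b : Int}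
    (ha : ∃ L, P L ∧ pyProd L = a) (hb : ∃ L, P L ∧ pyProd L = b) :
    ∃ L, P L ∧ pyProd L = min a b := by
  rcases le_total a b with h | h
  · rwa [min_eq_left h]
  · rwa [min_eq_right h]

lemma attain_max {P : List Int → Prop} {a b : Int}
    (ha : ∃ L, P L ∧ pyProd L = a) (hb : ∃ L, P L ∧ pyProd L = b) :
    ∃ L, P L ∧ pyProd L = max a b := by
  rcases le_total a b with h | h
  · rwa [max_eq_right h]
  · rwa [max_eq_left h]

lemma MMspec_congr {ws ws' : List Int} {k k' : Nat} {s s' : Int}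
    (h : ∀ L, Matching ws' k' s' L ↔ Matching ws k s L) :
    ∀ o, MMspec ws k s o → MMspec ws' k' s' o := by
  intro o ho
  cases o with
  | none => intro L hL; exact ho L ((h L).mp hL)
  | some mm =>
    obtain ⟨⟨L1, h1, e1⟩, ⟨L2, h2, e2⟩, hb⟩ := ho
    exact ⟨⟨L1, (h L1).mpr h1, e1⟩, ⟨L2, (h L2).mpr h2, e2⟩,
      fun L hL => hb L ((h L).mp hL)⟩

lemma dpInv_init (maxk : Int) :
    dpInv maxk [] ((PySem.Dict.empty).insert ((0 : Int), (0 : Int)) ((1 : Int), (1 : Int))) := by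
  constructor
  · exact PySem.Dict.nodup_keys_insert _ _ _ (by simp [PySem.Dict.keys_empty])
  intro c s
  rw [PySem.Dict.get?_insert]
  constructor
  · intro hno
    rw [if_neg, PySem.Dict.get?_empty]
    intro he
    apply hno
    left
    exact congrArg Prod.fst he
  · intro hok
    by_cases he : ((c, s) : Int × Int) = (0, 0)
    · rw [if_pos he]
      obtain ⟨hc, hs⟩ := Prod.mk.injEq .. ▸ he
      subst hc; subst hs
      refine ⟨⟨[], ⟨by simp [pyCombos], rfl⟩, rfl⟩, ⟨[], ⟨by simp [pyCombos], rfl⟩, rfl⟩, ?_⟩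
      rintro L ⟨hL, -⟩
      simp [pyCombos] at hL
      subst hL
      exact ⟨le_refl _, le_refl _⟩
    · rw [if_neg he, PySem.Dict.get?_empty]
      rintro L ⟨hL, hs⟩
      rw [mem_pyCombos] at hL
      obtain ⟨hlen, hsub⟩ := hL
      rw [List.sublist_nil] at hsub
      subst hsub
      apply he
      rcases hok with h0 | ⟨h1, -⟩
      · subst h0
        simp at hlen hs ⊢
        omega
      · simp at hlen
        omega

lemma dpInv_step (maxk w : Int) (pre : List Int) (dp : PySem.Dict (Int × Int) (Int × Int))
    (h : dpInv maxk pre dp) : dpInv maxk (pre ++ [w]) (bStep maxk w dp) := by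
  obtain ⟨hnd, hspec⟩ := h
  refine ⟨foldl_nodup maxk w _ _ hnd, ?_⟩
  intro c s
  rw [bStep_get? maxk w dp hnd c s]
  by_cases hcm : c < maxk
  · rw [if_pos hcm]
    constructor
    · intro hno
      have hc1 : ¬ CntOK maxk (c - 1) := by
        unfold CntOK at hno ⊢; omega
      rw [(hspec (c - 1) (s - w)).1 hc1]
      exact (hspec c s).1 hno
    · intro hok
      rcases hok with h0 | ⟨h1, h2⟩
      · -- c = 0 : nothing with w is recorded at size 0
        subst h0
        have hc1 : ¬ CntOK maxk (-1 : Int) := by unfold CntOK; omega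
        have : dp.get? ((0 : Int) - 1, s - w) = none := by
          simpa using (hspec (-1) (s - w)).1 hc1
        rw [this]
        refine MMspec_congr (fun L => ?_) _ ((hspec 0 s).2 (Or.inl rfl))
        rw [Matching_append]
        simp
      · -- 1 ≤ c < maxk
        have hk1 : (1 : Nat) ≤ c.toNat := by omega
        have hck : (c - 1).toNat = c.toNat - 1 := by omega
        have hok1 : CntOK maxk (c - 1) := by unfold CntOK; omega
        have hg1 := (hspec (c - 1) (s - w)).2 hok1
        have hg0 := (hspec c s).2 (Or.inr ⟨h1, h2⟩)
        rw [hck] at hg1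
        rcases hg1g : dp.get? (c - 1, s - w) with _ | ⟨lo, hi⟩ <;> rw [hg1g] at hg1
        · -- no new combinations through w
          refine MMspec_congr (fun L => ?_) _ hg0
          rw [Matching_append]
          constructor
          · rintro (hL | ⟨-, r, hr, -⟩)
            · exact hL
            · exact absurd hr (hg1 r)
          · exact Or.inl
        · obtain ⟨⟨rlo, hrlo, erlo⟩, ⟨rhi, hrhi, erhi⟩, hb1⟩ := hg1
          have hnewlo : ∃ L, Matching (pre ++ [w]) c.toNat s L ∧
              pyProd L = min (lo * w) (hi * w) := by
            apply attain_min (a := lo * w) (b := hi * w)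
            · exact ⟨rlo ++ [w], Matching_append.mpr (Or.inr ⟨hk1, rlo, hrlo, rfl⟩),
                by rw [pyProd_append, erlo]⟩
            · exact ⟨rhi ++ [w], Matching_append.mpr (Or.inr ⟨hk1, rhi, hrhi, rfl⟩),
                by rw [pyProd_append, erhi]⟩
          have hnewhi : ∃ L, Matching (pre ++ [w]) c.toNat s L ∧
              pyProd L = max (lo * w) (hi * w) := by
            apply attain_max (a := lo * w) (b := hi * w)
            · exact ⟨rlo ++ [w], Matching_append.mpr (Or.inr ⟨hk1, rlo, hrlo, rfl⟩),
                by rw [pyProd_append, erlo]⟩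
            · exact ⟨rhi ++ [w], Matching_append.mpr (Or.inr ⟨hk1, rhi, hrhi, rfl⟩),
                by rw [pyProd_append, erhi]⟩
          have hnewb : ∀ r, Matching pre (c.toNat - 1) (s - w) r →
              min (lo * w) (hi * w) ≤ pyProd (r ++ [w]) ∧
              pyProd (r ++ [w]) ≤ max (lo * w) (hi * w) := by
            intro r hr
            rw [pyProd_append]
            exact mul_between (hb1 r hr).1 (hb1 r hr).2
          rcases hg0g : dp.get? (c, s) with _ | ⟨plo, phi⟩ <;> rw [hg0g] at hg0
          · -- only the new combinations
            refine ⟨hnewlo, hnewhi, ?_⟩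
            intro L hL
            rcases Matching_append.mp hL with hold | ⟨-, r, hr, rfl⟩
            · exact absurd hold (hg0 L)
            · exact hnewb r hr
          · obtain ⟨⟨L1, h1', e1⟩, ⟨L2, h2', e2⟩, hb0⟩ := hg0
            have holdlo : ∃ L, Matching (pre ++ [w]) c.toNat s L ∧ pyProd L = plo :=
              ⟨L1, Matching_append.mpr (Or.inl h1'), e1⟩
            have holdhi : ∃ L, Matching (pre ++ [w]) c.toNat s L ∧ pyProd L = phi :=
              ⟨L2, Matching_append.mpr (Or.inl h2'), e2⟩
            refine ⟨attain_min holdlo hnewlo, attain_max holdhi hnewhi, ?_⟩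
            intro L hL
            rcases Matching_append.mp hL with hold | ⟨-, r, hr, rfl⟩
            · have := hb0 L hold
              exact ⟨le_trans (min_le_left _ _) this.1, le_trans this.2 (le_max_left _ _)⟩
            · have := hnewb r hr
              exact ⟨le_trans (min_le_right _ _) this.1, le_trans this.2 (le_max_right _ _)⟩
  · rw [if_neg hcm]
    constructor
    · exact (hspec c s).1
    · intro hok
      rcases hok with h0 | ⟨h1, h2⟩
      · subst h0
        refine MMspec_congr (fun L => ?_) _ ((hspec 0 s).2 (Or.inl rfl))
        rw [Matching_append]
        simp
      · omega

lemma dpInv_fold (maxk : Int) : ∀ (ws pre : List Int) (dp : PySem.Dict (Int × Int) (Int × Int)),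
    dpInv maxk pre dp → dpInv maxk (pre ++ ws) (ws.foldl (fun d x => bStep maxk x d) dp) := by
  intro ws
  induction ws with
  | nil => intro pre dp h; simpa using h
  | cons w ws ih =>
    intro pre dp h
    have := ih (pre ++ [w]) (bStep maxk w dp) (dpInv_step maxk w pre dp h)
    simpa using this

lemma scan_eq (weights : List Int) (goal res maxk : Int)
    (dp : PySem.Dict (Int × Int) (Int × Int)) (h : dpInv maxk weights dp) :
    ∀ ks : List Int, (∀ k ∈ ks, 1 ≤ k ∧ k < maxk) →
      aScan weights goal res ks = bQuery dp goal res ks := by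
  intro ks
  induction ks with
  | nil => intro _; rfl
  | cons k ks ih =>
    intro hks
    obtain ⟨hk1, hk2⟩ := hks k List.mem_cons_self
    have hok : CntOK maxk k := Or.inr ⟨hk1, hk2⟩
    have hmm := (h.2 k goal).2 hok
    rw [aScan, bQuery]
    have hmem : ∀ m ∈ (pyCombos k.toNat weights).map
        (fun c => if c.sum = goal then pyProd c else res),
        m = res ∨ ∃ L, Matching weights k.toNat goal L ∧ pyProd L = m := by
      intro m hm
      obtain ⟨c, hc, hcm⟩ := List.mem_map.mp hm
      by_cases hs : c.sum = goal
      · right; exact ⟨c, ⟨hc, hs⟩, by rw [← hcm, if_pos hs]⟩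
      · left; rw [← hcm, if_neg hs]
    rcases hdp : dp.get? (k, goal) with _ | ⟨lo, hi⟩ <;> rw [hdp] at hmm
    · -- no matching combination: every generator element is res
      have hall : ∀ m ∈ (pyCombos k.toNat weights).map
          (fun c => if c.sum = goal then pyProd c else res), m = res := by
        intro m hm
        rcases hmem m hm with h' | ⟨L, hL, -⟩
        · exact h'
        · exact absurd hL (hmm L)
      rcases hmin : PySem.List.min? ((pyCombos k.toNat weights).map
          (fun c => if c.sum = goal then pyProd c else res)) (fun x => x) with _ | m
      · rw [hmin]
        simp only [Option.getD_none, if_neg (lt_irrefl res)]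
        exact ih (fun j hj => hks j (List.mem_cons_of_mem _ hj))
      · rw [hmin]
        have : m = res := hall m (PySem.List.min?_mem hmin)
        simp only [Option.getD_some, this, if_neg (lt_irrefl res)]
        exact ih (fun j hj => hks j (List.mem_cons_of_mem _ hj))
    · obtain ⟨⟨Llo, hLlo, eLlo⟩, -, hb⟩ := hmm
      have hin : lo ∈ (pyCombos k.toNat weights).map
          (fun c => if c.sum = goal then pyProd c else res) :=
        List.mem_map.mpr ⟨Llo, hLlo.1, by rw [if_pos hLlo.2, eLlo]⟩
      obtain ⟨m, hmin⟩ : ∃ m, PySem.List.min? ((pyCombos k.toNat weights).map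
          (fun c => if c.sum = goal then pyProd c else res)) (fun x => x) = some m := by
        rcases hm : PySem.List.min? ((pyCombos k.toNat weights).map
            (fun c => if c.sum = goal then pyProd c else res)) (fun x => x) with _ | m
        · rw [PySem.List.min?_eq_none_iff] at hm
          rw [hm] at hin
          cases hin
        · exact ⟨m, hm⟩
      have hmle : m ≤ lo := PySem.List.min?_isMin hmin lo hin
      rw [hmin]
      by_cases hlo : lo < res
      · have hm_eq : m = lo := by
          rcases hmem m (PySem.List.min?_mem hmin) with h' | ⟨L, hL, e⟩
          · omega
          · have := (hb L hL).1
            omega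
        simp only [Option.getD_some, hm_eq, if_pos hlo]
      · have hmnlt : ¬ m < res := by
          rcases hmem m (PySem.List.min?_mem hmin) with h' | ⟨L, hL, e⟩
          · omega
          · have := (hb L hL).1
            omega
        simp only [Option.getD_some, if_neg hmnlt, if_neg hlo]
        exact ih (fun j hj => hks j (List.mem_cons_of_mem _ hj))

-- ===== VERDICT (by name: the statement is the Claim_ definition above) =====
theorem gen_config3_spec : Claim_equal_gen_config3 := by
  intro weights n_groups _ _
  unfold Spec_gen_config3 gen_config3 gen_config3_alt
  set goal := PySem.Int.floordiv weights.sum n_groups with hgoal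
  set maxk := PySem.Int.floordiv (weights.length : Int) n_groups with hmaxk
  by_cases hm : maxk ≤ 1
  · simp only [if_pos hm]
    rw [PySem.List.pyRange_one_eq_nil (by omega)]
    rfl
  · simp only [if_neg hm]
    have hinv := dpInv_fold maxk weights [] _ (dpInv_init maxk)
    simp only [List.nil_append] at hinv
    exact scan_eq weights goal (1000000000000) maxk _ hinv _
      (fun k hk => by
        have := PySem.List.mem_pyRange_one.mp hk
        omega)
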